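-- pv_equiv track=rewrite | github.com/CrzPhil/SubnetCalculator | main.py | shToDec
-- ===== SOURCE A (Python) =====
-- def shToDec(sh: int):
--     if 0 <= sh <= 32:
--         if sh % 8 == 0:
--             return 255
--
--         out = 0
--         j = 128
--
--         for i in range(sh % 8):
--             out += j
--             j //= 2
--         return out
--     else:
--         return -1
-- ===== SOURCE B (Python) =====
-- def shToDec(sh: int):
--     if 0 <= sh <= 32:
--         k = sh % 8
--         if k == 0:
--             return 255
--         return 256 - (256 >> k)
--     else:
--         return -1
-- ===== Notes on version B (the rewrite author's own statement) =====
-- stated objective: simpler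
-- what changed: The accumulation loop over the top bits is replaced by the single closed-form expression 256 - (256 >> (sh % 8)), keeping the range guard and the k==0 -> 255 case.
import Mathlib
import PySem

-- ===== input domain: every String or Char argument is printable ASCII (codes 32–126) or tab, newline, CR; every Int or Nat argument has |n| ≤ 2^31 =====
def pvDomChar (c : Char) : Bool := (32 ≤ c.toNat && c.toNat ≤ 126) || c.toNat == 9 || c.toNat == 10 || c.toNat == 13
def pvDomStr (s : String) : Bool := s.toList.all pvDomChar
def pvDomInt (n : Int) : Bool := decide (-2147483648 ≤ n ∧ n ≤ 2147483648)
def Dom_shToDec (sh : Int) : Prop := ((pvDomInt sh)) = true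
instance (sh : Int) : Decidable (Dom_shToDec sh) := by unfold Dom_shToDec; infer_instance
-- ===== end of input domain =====

-- B replaces A's bit-accumulation loop by the closed form 256 - (256 >> (sh % 8)) (objective: simpler).

-- ===== PORT A =====
def shToDec (sh : Int) : Int :=
  if 0 ≤ sh ∧ sh ≤ 32 then
    if PySem.Int.mod sh 8 = 0 then 255
    else
      let st := (PySem.List.pyRange 0 (PySem.Int.mod sh 8) 1).foldl
        (fun (s : Int × Int) _ => (s.1 + s.2, PySem.Int.floordiv s.2 2)) (0, 128)
      st.1
  else -1

-- ===== PORT B =====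
def shToDec_alt (sh : Int) : Int :=
  if 0 ≤ sh ∧ sh ≤ 32 then
    let k := PySem.Int.mod sh 8
    if k = 0 then 255
    else 256 - Int.ofNat (256 >>> k.toNat)   -- 256 >> k; k ∈ [1,7] here so the Nat shift is exact
  else -1

-- ===== PRECONDITION & SPEC =====
def Spec_shToDec (sh : Int) (out : Int) : Prop := out = shToDec_alt sh
instance (sh : Int) (out : Int) : Decidable (Spec_shToDec sh out) := by unfold Spec_shToDec; infer_instance

-- ===== CLAIM (what is proved, stated in full; the proofs are below) =====
def Claim_equal_shToDec : Prop := ∀ (sh : Int), Dom_shToDec sh → Spec_shToDec sh (shToDec sh)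

-- ===== LEMMAS AND PROOFS =====

-- both ports branch only on the range test and on sh % 8, so it suffices to check the 8 residues
lemma shToDec_eq_of_mod (sh t : Int) (h : 0 ≤ sh ∧ sh ≤ 32) (h' : 0 ≤ t ∧ t ≤ 32)
    (hm : PySem.Int.mod sh 8 = PySem.Int.mod t 8) :
    shToDec sh = shToDec t ∧ shToDec_alt sh = shToDec_alt t := by
  constructor <;>
    simp only [shToDec, shToDec_alt, hm, h.1, h.2, h'.1, h'.2, and_self, if_true]

-- ===== VERDICT (by name: the statement is the Claim_ definition above) =====
theorem shToDec_spec : Claim_equal_shToDec := by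
  intro sh _
  unfold Spec_shToDec
  by_cases h : 0 ≤ sh ∧ sh ≤ 32
  · have hm : PySem.Int.mod sh 8 = sh % 8 :=
      PySem.Int.mod_eq_emod_of_pos (by norm_num)
    have hm2 : PySem.Int.mod (sh % 8) 8 = (sh % 8) % 8 :=
      PySem.Int.mod_eq_emod_of_pos (by norm_num)
    have hb : 0 ≤ sh % 8 ∧ sh % 8 ≤ 32 := ⟨Int.emod_nonneg _ (by norm_num), by
      have := Int.emod_lt_of_pos sh (show (0:Int) < 8 by norm_num); omega⟩
    obtain ⟨hA, hB⟩ := shToDec_eq_of_mod sh (sh % 8) h hb (by rw [hm, hm2]; omega)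
    rw [hA, hB]
    have hr : sh % 8 = 0 ∨ sh % 8 = 1 ∨ sh % 8 = 2 ∨ sh % 8 = 3 ∨ sh % 8 = 4 ∨
        sh % 8 = 5 ∨ sh % 8 = 6 ∨ sh % 8 = 7 := by omega
    rcases hr with h0|h0|h0|h0|h0|h0|h0|h0 <;> rw [h0] <;> decide
  · simp [shToDec, shToDec_alt, h]
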